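-- pv_equiv track=rewrite | github.com/slamtheliquid/DataMining | lab1/main.py | gathering_to_set
-- ===== SOURCE A (Python) =====
-- import operator
--
-- def gathering_to_set(flist):
--     res = {}
--     for s in flist:
--         if s in res:
--             res.update({s: res.get(s) + 1})
--         else:
--             res[s] = 1
--     return sorted(res.items(), key=operator.itemgetter(1), reverse=True)
-- ===== SOURCE B (Python) =====
-- def gathering_to_set(flist):
--     counts = {}
--     for s in flist:
--         counts[s] = counts.get(s, 0) + 1
--     out = []
--     for c in sorted(set(counts.values()), reverse=True):
--         for k, v in counts.items():
--             if v == c: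
--                 out.append((k, v))
--     return out
-- ===== Notes on version B (the rewrite author's own statement) =====
-- stated objective: alternative
-- what changed: Replaces the stable reverse sort of the count dict's items by a bucket emission: collect the distinct counts, sort those (all distinct, so no stability concern), and for each count from largest down emit the keys with that count in dict insertion order, which reproduces the stable descending sort exactly.
import Mathlib
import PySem

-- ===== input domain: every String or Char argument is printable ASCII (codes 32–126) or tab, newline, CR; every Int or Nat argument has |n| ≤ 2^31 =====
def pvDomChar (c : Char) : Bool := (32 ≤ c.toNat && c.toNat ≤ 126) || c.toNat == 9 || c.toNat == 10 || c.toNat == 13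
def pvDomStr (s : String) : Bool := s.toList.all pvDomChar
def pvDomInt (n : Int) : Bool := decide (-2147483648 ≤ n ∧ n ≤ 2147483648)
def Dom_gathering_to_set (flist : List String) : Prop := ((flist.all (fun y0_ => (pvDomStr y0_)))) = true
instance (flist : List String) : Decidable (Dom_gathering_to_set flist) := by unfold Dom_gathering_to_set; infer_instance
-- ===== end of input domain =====

-- B replaces A's stable reverse sort of the count dict's items by bucket emission over the
-- distinct counts in descending order (alternative decomposition, same results).

-- ===== PORT A =====
def gathering_to_set (flist : List String) : List (String × Int) :=
  let res : PySem.Dict String Int :=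
    flist.foldl (fun d s =>
      if d.contains s then d.insert s ((d.get? s).getD 0 + 1)
      else d.insert s 1) PySem.Dict.empty
  PySem.List.sorted res.items (fun p => p.2) true

-- ===== PORT B =====
def gathering_to_set_alt (flist : List String) : List (String × Int) :=
  let counts : PySem.Dict String Int :=
    flist.foldl (fun d s => d.insert s (d.getD s 0 + 1)) PySem.Dict.empty
  (PySem.List.sorted (PySem.Set.ofList counts.values) (fun c => c) true).foldl
    (fun out c => counts.items.foldl (fun out p => if p.2 == c then out ++ [p] else out) out) []

-- ===== PRECONDITION & SPEC =====
def Spec_gathering_to_set (flist : List String) (out : List (String × Int)) : Prop := out = gathering_to_set_alt flist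
instance (flist : List String) (out : List (String × Int)) : Decidable (Spec_gathering_to_set flist out) := by unfold Spec_gathering_to_set; infer_instance

-- ===== CLAIM (what is proved, stated in full; the proofs are below) =====
def Claim_equal_gathering_to_set : Prop := ∀ (flist : List String), Dom_gathering_to_set flist → Spec_gathering_to_set flist (gathering_to_set flist)

-- ===== LEMMAS AND PROOFS =====

-- insertBy skips a prefix on which the comparison fails
theorem insertBy_append_not {α : Type} (bef : α → α → Bool) (x : α) (l r : List α)
    (h : ∀ y ∈ l, bef x y = false) :
    PySem.List.insertBy bef x (l ++ r) = l ++ PySem.List.insertBy bef x r := by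
  induction l with
  | nil => simp
  | cons y t ih =>
      have hy : bef x y = false := h y (by simp)
      simp [PySem.List.insertBy, hy, ih (fun z hz => h z (by simp [hz]))]

-- insertBy prepends when the comparison holds everywhere (in particular at the head)
theorem insertBy_all_before {α : Type} (bef : α → α → Bool) (x : α) (r : List α)
    (h : ∀ y ∈ r, bef x y = true) :
    PySem.List.insertBy bef x r = x :: r := by
  cases r with
  | nil => rfl
  | cons y t => simp [PySem.List.insertBy, h y (by simp)]

-- inserting into a bucketed list appends to the element's own bucket
theorem insertBy_buckets {α : Type} (key : α → Int) (x : α) (cs : List Int) (B : Int → List α)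
    (hcs : cs.Pairwise (· > ·)) (hx : key x ∈ cs)
    (hB : ∀ c ∈ cs, ∀ y ∈ B c, key y = c) :
    PySem.List.insertBy (fun a b => decide (key b < key a)) x (cs.flatMap B)
      = cs.flatMap (fun c => B c ++ if key x = c then [x] else []) := by
  induction cs with
  | nil => cases hx
  | cons c cs ih =>
      obtain ⟨hhead, htail⟩ := List.pairwise_cons.mp hcs
      by_cases hxc : key x = c
      · have h1 : ∀ y ∈ B c, (fun a b => decide (key b < key a)) x y = false := by
          intro y hy
          have := hB c (by simp) y hy
          simp [this, hxc]
        have h2 : ∀ y ∈ cs.flatMap B, (fun a b => decide (key b < key a)) x y = true := by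
          intro y hy
          obtain ⟨c', hc', hyc'⟩ := List.mem_flatMap.mp hy
          have := hB c' (by simp [hc']) y hyc'
          have hlt : c' < c := hhead c' hc'
          simp [this, hxc]
          omega
        rw [List.flatMap_cons, insertBy_append_not _ _ _ _ h1, insertBy_all_before _ _ _ h2,
          List.flatMap_cons, if_pos hxc]
        have : cs.flatMap (fun c' => B c' ++ if key x = c' then [x] else []) = cs.flatMap B := by
          apply List.flatMap_congr
          intro c' hc'
          have : key x ≠ c' := by have := hhead c' hc'; omega
          simp [this]
        rw [this]
        simp
      · have hx' : key x ∈ cs := by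
          rcases List.mem_cons.mp hx with h | h
          · exact absurd h hxc
          · exact h
        have h1 : ∀ y ∈ B c, (fun a b => decide (key b < key a)) x y = false := by
          intro y hy
          have hyc := hB c (by simp) y hy
          have : key x < c := hhead _ hx'
          simp [hyc]
          omega
        rw [List.flatMap_cons, insertBy_append_not _ _ _ _ h1,
          ih htail hx' (fun c' hc' => hB c' (by simp [hc'])),
          List.flatMap_cons, if_neg hxc]
        simp

-- the reverse-insertion-sort loop over a bucketed accumulator stays bucketed
theorem foldl_insertBy_buckets {α : Type} (key : α → Int) (cs : List Int)
    (hcs : cs.Pairwise (· > ·)) :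
    ∀ (xs : List α) (B : Int → List α), (∀ x ∈ xs, key x ∈ cs) →
      (∀ c ∈ cs, ∀ y ∈ B c, key y = c) →
      xs.foldl (fun acc x => PySem.List.insertBy (fun a b => decide (key b < key a)) x acc)
          (cs.flatMap B)
        = cs.flatMap (fun c => B c ++ xs.filter (fun a => key a == c)) := by
  intro xs
  induction xs with
  | nil => intro B _ _; simp
  | cons x xs ih =>
      intro B hx hB
      rw [List.foldl_cons, insertBy_buckets key x cs B hcs (hx x (by simp)) hB]
      rw [ih (fun c => B c ++ if key x = c then [x] else []) (fun z hz => hx z (by simp [hz]))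
        (by
          intro c hc y hy
          rcases List.mem_append.mp hy with h | h
          · exact hB c hc y h
          · by_cases hxc : key x = c
            · simp [hxc] at h; subst h; exact hxc
            · simp [hxc] at h)]
      apply List.flatMap_congr
      intro c hc
      by_cases hxc : key x = c <;> simp [hxc]

-- stable descending sort = buckets of equal keys, listed by descending distinct key
theorem sorted_rev_buckets {α : Type} (xs : List α) (key : α → Int) :
    PySem.List.sorted xs key true
      = (PySem.List.sorted (PySem.Set.ofList (xs.map key)) (fun c => c) true).flatMap
          (fun c => xs.filter (fun a => key a == c)) := by
  set cs := PySem.List.sorted (PySem.Set.ofList (xs.map key)) (fun c => c) true with hcsdef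
  have hperm : cs.Perm (PySem.Set.ofList (xs.map key)) := PySem.List.sorted_perm _ _ _
  have hnd : cs.Nodup := hperm.symm.nodup (PySem.Set.nodup_ofList _)
  have hge : cs.Pairwise (fun a b => b ≤ a) := PySem.List.sorted_pairwise_rev _ _
  have hcs : cs.Pairwise (· > ·) := by
    have := hge.and hnd
    exact this.imp (fun h => lt_of_le_of_ne h.1 (Ne.symm h.2))
  have hmem : ∀ x ∈ xs, key x ∈ cs := by
    intro x hx
    rw [PySem.List.mem_sorted]
    exact (PySem.Set.mem_ofList _ _).mpr (List.mem_map_of_mem hx)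
  have h := foldl_insertBy_buckets key cs hcs xs (fun _ => []) hmem (by simp)
  have h0 : cs.flatMap (fun _ => ([] : List α)) = [] := by simp
  rw [h0] at h
  rw [PySem.List.sorted_rev_eq_foldl_insertBy]
  simpa using h

-- A's counting loop builds the same dict as B's (and both are Counter(flist))
theorem count_loop_eq (flist : List String) :
    flist.foldl (fun d s =>
        if d.contains s then d.insert s ((d.get? s).getD 0 + 1)
        else d.insert s 1) PySem.Dict.empty
      = PySem.Dict.counter flist := by
  rw [← PySem.Dict.foldl_insert_getD_add_one_eq_counter]
  congr 1
  funext d s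
  by_cases h : d.contains s
  · rw [if_pos h, PySem.Dict.getD_eq_get?_getD]
  · have h0 : d.getD s 0 = 0 := PySem.Dict.getD_of_not_contains d 0 (by simpa using h)
    rw [if_neg (by simp [h]), h0]
    norm_num

-- ===== VERDICT (by name: the statement is the Claim_ definition above) =====
theorem gathering_to_set_spec : Claim_equal_gathering_to_set := by
  intro flist _
  unfold Spec_gathering_to_set gathering_to_set gathering_to_set_alt
  rw [count_loop_eq, PySem.Dict.foldl_insert_getD_add_one_eq_counter]
  set d := PySem.Dict.counter flist with hd
  have hvals : d.values = d.items.map (fun p => p.2) := rfl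
  rw [sorted_rev_buckets d.items (fun p => p.2), ← hvals]
  set cs := PySem.List.sorted (PySem.Set.ofList d.values) (fun c => c) true with hcs
  have hinner : ∀ (out : List (String × Int)) (c : Int),
      d.items.foldl (fun out p => if p.2 == c then out ++ [p] else out) out
        = out ++ d.items.filter (fun p => p.2 == c) := by
    intro out c
    have := PySem.List.foldl_append_if (fun p : String × Int => p.2 == c) id d.items out
    simpa using this
  calc cs.flatMap (fun c => d.items.filter (fun p => p.2 == c))
      = [] ++ cs.flatMap (fun c => d.items.filter (fun p => p.2 == c)) := by simp
    _ = cs.foldl (fun out c => out ++ d.items.filter (fun p => p.2 == c)) [] := by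
        rw [PySem.List.foldl_append_eq_flatMap]
    _ = cs.foldl (fun out c => d.items.foldl (fun out p => if p.2 == c then out ++ [p] else out) out) [] := by
        congr 1
        funext out c
        exact (hinner out c).symm
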